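-- pv_equiv track=rewrite | github.com/mxruedag/ProblemSolving | project-euler/problem201.py | sums_of_subsets
-- ===== SOURCE A (Python) =====
-- def sums_of_subsets(s, m):
-- 	"""
-- 	Gets the counts of the sums of all the subsets of s of size m
-- 	"""
-- 	if len(s) == m:
-- 		return {sum(s): 1}
-- 	if m == 1:
-- 		ans = {}
-- 		for elt in s:
-- 			if elt in ans:
-- 				ans[elt] += 1
-- 			else:
-- 				ans[elt] = 1
-- 		return ans
-- 	ans = []
-- 	elt = s[0]
-- 	sums_without_elt = sums_of_subsets(s[1:], m)
-- 	sums_with_elt = sums_of_subsets(s[1:], m-1)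
-- 	ans = sums_without_elt.copy()
-- 	for k, v in sums_with_elt.items():
-- 		if k+elt in ans:
-- 			ans[k+elt] += v
-- 		else:
-- 			ans[k+elt] = v
-- 	return ans
-- ===== SOURCE B (Python) =====
-- def sums_of_subsets(s, m):
-- 	"""
-- 	Gets the counts of the sums of all the subsets of s of size m
-- 	"""
-- 	n = len(s)
-- 	if n == m:
-- 		return {sum(s): 1}
-- 	if m == 1:
-- 		d = {}
-- 		for y in s:
-- 			d[y] = d.get(y, 0) + 1
-- 		return d
-- 	# bottom-up DP over suffixes of s: after processing suffix t,
-- 	# row[j] = counts of sums of the size-j subsets of t, for 1 <= j <= min(m, len(t))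
-- 	row = {}
-- 	suffix = []
-- 	for x in reversed(s):
-- 		suffix = [x] + suffix
-- 		L = len(suffix)
-- 		new = {}
-- 		for j in range(1, m + 1):
-- 			if j > L:
-- 				continue
-- 			if j == L:
-- 				new[j] = {sum(suffix): 1}
-- 			elif j == 1:
-- 				d = {}
-- 				for y in suffix:
-- 					d[y] = d.get(y, 0) + 1
-- 				new[j] = d
-- 			else:
-- 				d = dict(row[j])
-- 				for k, v in row[j - 1].items():
-- 					d[k + x] = d.get(k + x, 0) + v
-- 				new[j] = d
-- 		row = new
-- 	return row[m]
-- ===== Notes on version B (the rewrite author's own statement) =====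
-- stated objective: alternative
-- what changed: Replaces A's top-down recursion over (suffix, size) with an iterative bottom-up DP over suffixes that keeps, per subset size j<=m, a dict of sum counts and updates all rows once per element.
import Mathlib
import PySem

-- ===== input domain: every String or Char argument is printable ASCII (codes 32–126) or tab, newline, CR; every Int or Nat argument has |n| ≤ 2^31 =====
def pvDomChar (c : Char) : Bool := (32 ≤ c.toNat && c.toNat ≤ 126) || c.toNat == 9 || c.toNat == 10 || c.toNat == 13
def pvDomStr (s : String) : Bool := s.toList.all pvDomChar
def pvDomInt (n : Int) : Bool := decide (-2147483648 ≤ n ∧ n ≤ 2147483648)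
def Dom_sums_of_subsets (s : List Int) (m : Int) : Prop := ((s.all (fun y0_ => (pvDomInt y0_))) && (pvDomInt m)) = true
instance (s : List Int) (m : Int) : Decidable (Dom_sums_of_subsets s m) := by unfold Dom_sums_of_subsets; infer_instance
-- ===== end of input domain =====

-- B replaces A's top-down recursion by an iterative bottom-up DP over suffixes of s;
-- dicts are returned as insertion-ordered association lists and equality below is exact, order included.

-- ===== PORT A =====
def sums_of_subsets (s : List Int) (m : Int) : List (Int × Int) :=
    if (s.length : Int) = m then [(s.sum, 1)]
    else if m = 1 then
      (s.foldl (fun ans elt =>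
          match PySem.Dict.get? ans elt with
          | some v => ans.insert elt (v + 1)
          | none => ans.insert elt (1 : Int)) (PySem.Dict.empty : PySem.Dict Int Int)).items
    else
      match s with
      | [] => []   -- Python raises IndexError at s[0] here; excluded by Pre_
      | elt :: rest =>
        let sums_without_elt := sums_of_subsets rest m
        let sums_with_elt := sums_of_subsets rest (m - 1)
        ((PySem.Dict.mk sums_with_elt).items.foldl (fun ans kv =>
            match PySem.Dict.get? ans (kv.1 + elt) with
            | some v => ans.insert (kv.1 + elt) (v + kv.2)
            | none => ans.insert (kv.1 + elt) kv.2) (PySem.Dict.mk sums_without_elt)).items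

-- ===== PORT B =====
-- counts dict of the elements of `suffix` (the j == 1 base row)
def pvCounts (suffix : List Int) : PySem.Dict Int Int :=
  suffix.foldl (fun d y => d.insert y (d.getD y 0 + 1)) PySem.Dict.empty

-- `d = dict(row[j]); for k, v in row[j-1].items(): d[k+x] = d.get(k+x, 0) + v`
def pvMerge (x : Int) (dj djm1 : PySem.Dict Int Int) : PySem.Dict Int Int :=
  djm1.items.foldl (fun d kv => d.insert (kv.1 + x) (d.getD (kv.1 + x) 0 + kv.2)) dj

-- one step of the DP: the new row for suffix `suffix = x :: _` from the previous row
-- (Python's `row[j]` / `row[j-1]` lookups always hit under Pre_; ported as getD with an empty default)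
def pvRowStep (m : Int) (x : Int) (suffix : List Int) (row : PySem.Dict Int (PySem.Dict Int Int)) :
    PySem.Dict Int (PySem.Dict Int Int) :=
  (PySem.List.pyRange 1 (m + 1) 1).foldl (fun new j =>
    if j > (suffix.length : Int) then new
    else if j = (suffix.length : Int) then new.insert j (PySem.Dict.mk [(suffix.sum, 1)])
    else if j = 1 then new.insert j (pvCounts suffix)
    else new.insert j (pvMerge x (row.getD j PySem.Dict.empty) (row.getD (j - 1) PySem.Dict.empty)))
    PySem.Dict.empty

def sums_of_subsets_alt (s : List Int) (m : Int) : List (Int × Int) :=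
  if (s.length : Int) = m then [(s.sum, 1)]
  else if m = 1 then (pvCounts s).items
  else
    let st := s.reverse.foldl
      (fun (st : PySem.Dict Int (PySem.Dict Int Int) × List Int) x =>
        (pvRowStep m x (x :: st.2) st.1, x :: st.2))
      (PySem.Dict.empty, [])
    (st.1.getD m PySem.Dict.empty).items   -- row[m]; its KeyError (where A raises too) is outside Pre_

-- ===== PRECONDITION & SPEC =====
-- Pre_ admits exactly the inputs on which A returns normally (m = len(s), m = 1, or 1 <= m <= len(s));
-- on all other inputs A's recursion reaches s[0] of an empty list and raises IndexError (and B's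
-- final row[m] raises KeyError).
def Pre_sums_of_subsets (s : List Int) (m : Int) : Prop :=
  m = (s.length : Int) ∨ m = 1 ∨ (1 ≤ m ∧ m ≤ (s.length : Int))
instance (s : List Int) (m : Int) : Decidable (Pre_sums_of_subsets s m) := by
  unfold Pre_sums_of_subsets; infer_instance

def pvWitness_sums_of_subsets : List Int × Int := ([1, 2, 3, 2], 2)

def Spec_sums_of_subsets (s : List Int) (m : Int) (out : List (Int × Int)) : Prop := out = sums_of_subsets_alt s m
instance (s : List Int) (m : Int) (out : List (Int × Int)) : Decidable (Spec_sums_of_subsets s m out) := by unfold Spec_sums_of_subsets; infer_instance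

-- ===== CLAIM (what is proved, stated in full; the proofs are below) =====
def Claim_equal_sums_of_subsets : Prop := ∀ (s : List Int) (m : Int), Dom_sums_of_subsets s m → Pre_sums_of_subsets s m → Spec_sums_of_subsets s m (sums_of_subsets s m)


-- ===== LEMMAS AND PROOFS =====

-- the row the DP maintains for suffix t: key j ↦ A's dict for (t, j), for j = 1 .. min m (len t)
def pvTarget (t : List Int) (m : Int) : PySem.Dict Int (PySem.Dict Int Int) :=
  PySem.Dict.mk ((PySem.List.pyRange 1 (min m (t.length : Int) + 1) 1).map
    (fun j => (j, PySem.Dict.mk (sums_of_subsets t j))))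

theorem pvCounts_step (d : PySem.Dict Int Int) (y : Int) :
    (match PySem.Dict.get? d y with
     | some v => d.insert y (v + 1)
     | none => d.insert y (1 : Int)) = d.insert y (d.getD y 0 + 1) := by
  cases h : PySem.Dict.get? d y <;> simp [PySem.Dict.getD_eq_get?_getD, h]

theorem pvMerge_step (x : Int) (d : PySem.Dict Int Int) (kv : Int × Int) :
    (match PySem.Dict.get? d (kv.1 + x) with
     | some v => d.insert (kv.1 + x) (v + kv.2)
     | none => d.insert (kv.1 + x) kv.2) = d.insert (kv.1 + x) (d.getD (kv.1 + x) 0 + kv.2) := by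
  cases h : PySem.Dict.get? d (kv.1 + x) <;> simp [PySem.Dict.getD_eq_get?_getD, h]

theorem pvTarget_getD (t : List Int) (m j : Int) (h1 : 1 ≤ j) (h2 : j ≤ min m (t.length : Int)) :
    (pvTarget t m).getD j PySem.Dict.empty = PySem.Dict.mk (sums_of_subsets t j) := by
  have hmem : (j, PySem.Dict.mk (sums_of_subsets t j)) ∈ (pvTarget t m).items := by
    exact List.mem_map_of_mem (PySem.List.mem_pyRange_one.mpr ⟨h1, by omega⟩)
  have hnd : (pvTarget t m).keys.Nodup := by
    have hkeys : (pvTarget t m).keys = PySem.List.pyRange 1 (min m (t.length : Int) + 1) 1 := by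
      unfold pvTarget
      rw [PySem.Dict.keys_mk, List.map_map]
      exact List.map_id _
    rw [hkeys]
    exact PySem.List.nodup_pyRange_one 1 (min m (t.length : Int) + 1)
  exact PySem.Dict.getD_of_mem_items _ hmem hnd _

-- the per-key value the DP row step inserts
def pvV (m x : Int) (t : List Int) (j : Int) : PySem.Dict Int Int :=
  if j = ((x :: t).length : Int) then PySem.Dict.mk [((x :: t).sum, 1)]
  else if j = 1 then pvCounts (x :: t)
  else pvMerge x ((pvTarget t m).getD j PySem.Dict.empty) ((pvTarget t m).getD (j - 1) PySem.Dict.empty)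

theorem pvCounts_eq (l : List Int) :
    (l.foldl (fun ans elt =>
        match PySem.Dict.get? ans elt with
        | some v => ans.insert elt (v + 1)
        | none => ans.insert elt (1 : Int)) (PySem.Dict.empty : PySem.Dict Int Int)) = pvCounts l := by
  unfold pvCounts
  have hf : (fun (ans : PySem.Dict Int Int) (elt : Int) =>
      match PySem.Dict.get? ans elt with
      | some v => ans.insert elt (v + 1)
      | none => ans.insert elt (1 : Int))
      = fun d y => d.insert y (d.getD y 0 + 1) := by
    funext d y; exact pvCounts_step d y
  rw [hf]

theorem pvMerge_eq (x : Int) (dj djm1 : PySem.Dict Int Int) :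
    (djm1.items.foldl (fun ans kv =>
        match PySem.Dict.get? ans (kv.1 + x) with
        | some v => ans.insert (kv.1 + x) (v + kv.2)
        | none => ans.insert (kv.1 + x) kv.2) dj) = pvMerge x dj djm1 := by
  unfold pvMerge
  have hf : (fun (ans : PySem.Dict Int Int) (kv : Int × Int) =>
      match PySem.Dict.get? ans (kv.1 + x) with
      | some v => ans.insert (kv.1 + x) (v + kv.2)
      | none => ans.insert (kv.1 + x) kv.2)
      = fun d kv => d.insert (kv.1 + x) (d.getD (kv.1 + x) 0 + kv.2) := by
    funext d kv; exact pvMerge_step x d kv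
  rw [hf]

theorem pvV_eq (m x : Int) (t : List Int) (j : Int) (h1 : 1 ≤ j)
    (h2 : j ≤ min m ((x :: t).length : Int)) :
    pvV m x t j = PySem.Dict.mk (sums_of_subsets (x :: t) j) := by
  have hjm : j ≤ m := le_trans h2 (min_le_left _ _)
  have hjL : j ≤ ((x :: t).length : Int) := le_trans h2 (min_le_right _ _)
  unfold pvV
  conv_rhs => rw [sums_of_subsets.eq_def]
  by_cases hL : j = ((x :: t).length : Int)
  · rw [if_pos hL, if_pos hL.symm]
  · have hne : ¬ (((x :: t).length : Int) = j) := fun hh => hL hh.symm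
    rw [if_neg hL, if_neg hne]
    by_cases hj1 : j = 1
    · rw [if_pos hj1, if_pos hj1, ← pvCounts_eq]
    · rw [if_neg hj1, if_neg hj1]
      have hLen : ((x :: t).length : Int) = (t.length : Int) + 1 := by
        push_cast [List.length_cons]; ring
      rw [pvTarget_getD t m j h1 (le_min hjm (by omega)),
          pvTarget_getD t m (j - 1) (by omega) (le_min (by omega) (by omega))]
      rw [← pvMerge_eq]

theorem pvRowStep_eq (m x : Int) (t : List Int) :
    pvRowStep m x (x :: t) (pvTarget t m) = pvTarget (x :: t) m := by
  by_cases hm : m ≤ 0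
  · have e1 : PySem.List.pyRange 1 (m + 1) 1 = [] := PySem.List.pyRange_one_eq_nil (by omega)
    have hmin : min m ((x :: t).length : Int) = m :=
      min_eq_left (by have := Int.natCast_nonneg ((x :: t).length); omega)
    have e2 : PySem.List.pyRange 1 (min m ((x :: t).length : Int) + 1) 1 = [] := by
      rw [hmin]; exact PySem.List.pyRange_one_eq_nil (by omega)
    unfold pvRowStep pvTarget
    rw [e1, e2]
    rfl
  · have hm1 : (1 : Int) ≤ m := by omega
    have hL1 : (1 : Int) ≤ ((x :: t).length : Int) := by push_cast [List.length_cons]; omega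
    have hKm : min m ((x :: t).length : Int) ≤ m := min_le_left _ _
    have hKL : min m ((x :: t).length : Int) ≤ ((x :: t).length : Int) := min_le_right _ _
    have hK1 : 1 ≤ min m ((x :: t).length : Int) := le_min hm1 hL1
    have hKc : min m ((x :: t).length : Int) = m ∨
        min m ((x :: t).length : Int) = ((x :: t).length : Int) := min_choice _ _
    unfold pvRowStep
    rw [PySem.List.pyRange_one_append 1 (min m ((x :: t).length : Int) + 1) (m + 1)
          (by omega) (by omega),
        List.foldl_append]
    refine Eq.trans (Eq.trans
      (PySem.List.foldl_congr_mem _ _ (fun acc _ => acc) _ ?skip)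
      (PySem.List.foldl_ignore _ _)) ?main
    case skip =>
      intro acc j hj
      rcases PySem.List.mem_pyRange_one.mp hj with ⟨hja, hjb⟩
      have hLj : ((x :: t).length : Int) < j := by omega
      simp only [gt_iff_lt, if_pos hLj]
    case main =>
      refine Eq.trans
        (PySem.List.foldl_congr_mem _ _ (fun new j => new.insert j (pvV m x t j)) _ ?ins) ?rest
      case ins =>
        intro acc j hj
        rcases PySem.List.mem_pyRange_one.mp hj with ⟨hja, hjb⟩
        have hng : ¬ (((x :: t).length : Int) < j) := by omega
        simp only [gt_iff_lt, if_neg hng, pvV]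
        split_ifs <;> rfl
      case rest =>
        apply PySem.Dict.ext
        have hit := PySem.Dict.items_foldl_insert_fresh
          (PySem.List.pyRange 1 (min m ((x :: t).length : Int) + 1) 1)
          (fun (j : Int) => j) (pvV m x t) PySem.Dict.empty
          (fun a _ => PySem.Dict.contains_empty a)
          (by simpa using PySem.List.nodup_pyRange_one 1 (min m ((x :: t).length : Int) + 1))
        rw [hit]
        unfold pvTarget
        exact List.map_congr_left (fun j hj => by
          rcases PySem.List.mem_pyRange_one.mp hj with ⟨hja, hjb⟩
          simp only [pvV_eq m x t j hja (by omega)])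

theorem pvInv (m : Int) (t : List Int) :
    t.reverse.foldl
      (fun (st : PySem.Dict Int (PySem.Dict Int Int) × List Int) x =>
        (pvRowStep m x (x :: st.2) st.1, x :: st.2))
      (PySem.Dict.empty, []) = (pvTarget t m, t) := by
  rw [List.foldl_reverse]
  induction t with
  | nil =>
      simp [pvTarget]
      rfl
  | cons x t ih =>
      simp only [List.foldr_cons, ih]
      exact Prod.ext (pvRowStep_eq m x t) rfl

-- ===== VERDICT (by name: the statement is the Claim_ definition above) =====
theorem sums_of_subsets_spec : Claim_equal_sums_of_subsets := by
  intro s m _ hpre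
  unfold Pre_sums_of_subsets at hpre
  unfold Spec_sums_of_subsets sums_of_subsets_alt
  by_cases h : (s.length : Int) = m
  · rw [if_pos h, sums_of_subsets.eq_def, if_pos h]
  · rw [if_neg h]
    by_cases hm1 : m = 1
    · rw [if_pos hm1, sums_of_subsets.eq_def, if_neg (fun hh => h hh), if_pos hm1,
          pvCounts_eq]
    rw [if_neg hm1]
    simp only [pvInv m s]
    cases s with
    | nil =>
        exfalso
        simp only [List.length_nil, Nat.cast_zero] at h
        rcases hpre with h0 | h0 | h0 <;> simp_all <;> omega
    | cons y t' =>
        have hlen : (1 : Int) ≤ ((y :: t').length : Int) := by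
          push_cast [List.length_cons]; omega
        have hmle : 1 ≤ m ∧ m ≤ ((y :: t').length : Int) := by
          rcases hpre with h0 | h0 | h0 <;> constructor <;> simp_all <;> omega
        rw [pvTarget_getD (y :: t') m m hmle.1 (le_min le_rfl hmle.2)]
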